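-- pv_equiv track=rewrite | github.com/mikebsg01/Competitive-Programming | CodeSignal/Arcade/Graphs/Kingdom Roads/EfficientRoadNetwork-BESTSOLUTION.py | efficientRoadNetwork
-- ===== SOURCE A (Python) =====
-- def efficientRoadNetwork(n, roads):
--     vertex_dict = dict()
--     for i in range(0,n):
--         vertex_dict[i] = set()
--     for road in roads:
--         i,j = road
--         if j not in vertex_dict[i]:
--             vertex_dict[i].add(j)
--         if i not in vertex_dict[j]:
--             vertex_dict[j].add(i)
--     for i in range(0,n):
--         for j in range(i+1,n):
--             if i in vertex_dict[j] or j in vertex_dict[i] or len(vertex_dict[i]&vertex_dict[j]) >= 1: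
--                 continue
--             else:
--                 return False
--     return True
-- ===== SOURCE B (Python) =====
-- def efficientRoadNetwork(n, roads):
--     adj = [set() for _ in range(n)]
--     for a, b in roads:
--         adj[a].add(b)
--         adj[b].add(a)
--
--     def covers(i):
--         reach = {i} | adj[i]
--         for k in adj[i]:
--             reach |= adj[k]
--         return len(reach) == n
--
--     return all(covers(i) for i in range(n))
-- ===== Notes on version B (the rewrite author's own statement) =====
-- stated objective: alternative
-- what changed: Replaces A's dict-of-sets plus explicit pairwise (i,j) common-neighbor intersection scan by a list-of-sets adjacency and a per-vertex 2-hop reachability closure (reach(i) = {i} | adj(i) | union of adj(k) for k in adj(i)) checked to cover all n vertices.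
import Mathlib
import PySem

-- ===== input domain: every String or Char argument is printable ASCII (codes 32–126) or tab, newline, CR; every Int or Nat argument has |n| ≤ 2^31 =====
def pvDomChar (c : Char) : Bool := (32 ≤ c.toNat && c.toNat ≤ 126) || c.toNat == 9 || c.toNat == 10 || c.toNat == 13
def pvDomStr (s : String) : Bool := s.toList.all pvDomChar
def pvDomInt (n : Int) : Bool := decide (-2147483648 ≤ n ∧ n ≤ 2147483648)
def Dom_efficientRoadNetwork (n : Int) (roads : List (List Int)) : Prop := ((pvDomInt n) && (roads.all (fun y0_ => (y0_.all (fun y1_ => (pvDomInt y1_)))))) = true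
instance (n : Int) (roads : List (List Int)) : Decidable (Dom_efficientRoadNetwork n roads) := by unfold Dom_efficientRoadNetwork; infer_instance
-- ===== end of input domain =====

-- B replaces A's dict-of-sets with its explicit pairwise common-neighbor scan over all (i,j)
-- by a list-of-sets adjacency and a per-vertex 2-hop reachability closure
-- (reach(i) = {i} ∪ adj(i) ∪ ⋃_{k∈adj(i)} adj(k)) checked to cover all n vertices:
-- a different decomposition of the diameter-≤-2 test, similar cost.


-- ===== PORT A =====
-- one pass of A's road loop: 'i,j = road; if j not in vertex_dict[i]: vertex_dict[i].add(j); if i not in ...'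
def ernStep (d : PySem.Dict Int (PySem.Set Int)) (road : List Int) : PySem.Dict Int (PySem.Set Int) :=
  let i := PySem.List.pyGetD road 0 0
  let j := PySem.List.pyGetD road 1 0
  let d1 := if PySem.Set.contains (d.getD i PySem.Set.empty) j then d
            else d.insert i (PySem.Set.add (d.getD i PySem.Set.empty) j)
  if PySem.Set.contains (d1.getD j PySem.Set.empty) i then d1
  else d1.insert j (PySem.Set.add (d1.getD j PySem.Set.empty) i)

def efficientRoadNetwork (n : Int) (roads : List (List Int)) : Bool :=
  let vd0 := (PySem.List.pyRange 0 n 1).foldl (fun d i => d.insert i PySem.Set.empty) PySem.Dict.empty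
  let vd := roads.foldl ernStep vd0
  (PySem.List.pyRange 0 n 1).all fun i =>
    (PySem.List.pyRange (i+1) n 1).all fun j =>
      PySem.Set.contains (vd.getD j PySem.Set.empty) i ||
      PySem.Set.contains (vd.getD i PySem.Set.empty) j ||
      decide (1 ≤ PySem.Set.len (PySem.Set.inter (vd.getD i PySem.Set.empty) (vd.getD j PySem.Set.empty)))

-- ===== PORT B =====
-- one pass of B's road loop: 'a, b = road; adj[a].add(b); adj[b].add(a)' on the list adj
-- (pySetD/pyGetD are Python-exact list indexing; inside Pre_ every index is in range)
def ernBuild (adj : List (PySem.Set Int)) (road : List Int) : List (PySem.Set Int) :=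
  let a := PySem.List.pyGetD road 0 0
  let b := PySem.List.pyGetD road 1 0
  let adj1 := PySem.List.pySetD adj a (PySem.Set.add (PySem.List.pyGetD adj a PySem.Set.empty) b)
  PySem.List.pySetD adj1 b (PySem.Set.add (PySem.List.pyGetD adj1 b PySem.Set.empty) a)

-- B's helper 'covers(i)': reach = {i} | adj[i]; for k in adj[i]: reach |= adj[k]; len(reach) == n
def ernCovers (n : Int) (adj : List (PySem.Set Int)) (i : Int) : Bool :=
  let nbrs := PySem.List.pyGetD adj i PySem.Set.empty
  let reach := nbrs.foldl
    (fun r k => PySem.Set.union r (PySem.List.pyGetD adj k PySem.Set.empty))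
    (PySem.Set.union (PySem.Set.add PySem.Set.empty i) nbrs)
  decide (PySem.Set.len reach = n)

def efficientRoadNetwork_alt (n : Int) (roads : List (List Int)) : Bool :=
  let adj := roads.foldl ernBuild ((PySem.List.pyRange 0 n 1).map (fun _ => PySem.Set.empty))
  (PySem.List.pyRange 0 n 1).all (ernCovers n adj)

-- ===== PRECONDITION & SPEC =====
-- Pre_ excludes exactly the inputs where A raises: a road that is not a 2-element list
-- (ValueError on unpacking) or a road endpoint outside range(n) (KeyError on vertex_dict).
def Pre_efficientRoadNetwork (n : Int) (roads : List (List Int)) : Prop :=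
  ∀ road ∈ roads, road.length = 2 ∧ ∀ v ∈ road, 0 ≤ v ∧ v < n
instance (n : Int) (roads : List (List Int)) : Decidable (Pre_efficientRoadNetwork n roads) := by unfold Pre_efficientRoadNetwork; infer_instance

def pvWitness_efficientRoadNetwork : Int × List (List Int) := (3, [[0, 1], [1, 2]])

def Spec_efficientRoadNetwork (n : Int) (roads : List (List Int)) (out : Bool) : Prop := out = efficientRoadNetwork_alt n roads
instance (n : Int) (roads : List (List Int)) (out : Bool) : Decidable (Spec_efficientRoadNetwork n roads out) := by unfold Spec_efficientRoadNetwork; infer_instance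

-- ===== CLAIM (what is proved, stated in full; the proofs are below) =====
def Claim_equal_efficientRoadNetwork : Prop := ∀ (n : Int) (roads : List (List Int)), Dom_efficientRoadNetwork n roads → Pre_efficientRoadNetwork n roads → Spec_efficientRoadNetwork n roads (efficientRoadNetwork n roads)

-- ===== LEMMAS AND PROOFS =====

-- the adjacency set A's dict assigns to a vertex
def gE (d : PySem.Dict Int (PySem.Set Int)) (x : Int) : PySem.Set Int := d.getD x PySem.Set.empty

lemma gE_def (d : PySem.Dict Int (PySem.Set Int)) (x : Int) : d.getD x PySem.Set.empty = gE d x := rfl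

-- the adjacency set B's list assigns to a vertex
def gB (adj : List (PySem.Set Int)) (x : Int) : PySem.Set Int := PySem.List.pyGetD adj x PySem.Set.empty

-- 'road touches the ordered pair (x, y)'
def roadTouch (road : List Int) (x y : Int) : Prop :=
  (x = PySem.List.pyGetD road 0 0 ∧ y = PySem.List.pyGetD road 1 0) ∨
  (x = PySem.List.pyGetD road 1 0 ∧ y = PySem.List.pyGetD road 0 0)

-- ---------- A side ----------
lemma gE_init (l : List Int) (d : PySem.Dict Int (PySem.Set Int))
    (h : ∀ x, gE d x = PySem.Set.empty) (x : Int) :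
    gE (l.foldl (fun d i => d.insert i PySem.Set.empty) d) x = PySem.Set.empty := by
  induction l generalizing d with
  | nil => exact h x
  | cons a l ih =>
      simp only [List.foldl_cons]
      apply ih
      intro y
      by_cases hy : y = a
      · subst hy; simp [gE, PySem.Dict.getD_insert_self]
      · simpa [gE, PySem.Dict.getD_insert_of_ne _ _ _ hy] using h y

lemma mem_cond_insert (d : PySem.Dict Int (PySem.Set Int)) (i j x y : Int) :
    y ∈ (if PySem.Set.contains (d.getD i PySem.Set.empty) j then d
         else d.insert i (PySem.Set.add (d.getD i PySem.Set.empty) j)).getD x PySem.Set.empty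
      ↔ y ∈ d.getD x PySem.Set.empty ∨ (x = i ∧ y = j) := by
  split_ifs with h
  · rw [PySem.Set.contains_iff] at h
    constructor
    · tauto
    · rintro (hy | ⟨rfl, rfl⟩)
      · exact hy
      · exact h
  · by_cases hxi : x = i
    · subst hxi
      simp only [PySem.Dict.getD_insert_self, PySem.Set.mem_add]
      tauto
    · simp only [PySem.Dict.getD_insert_of_ne _ _ _ hxi]
      tauto

lemma mem_gE_step (d : PySem.Dict Int (PySem.Set Int)) (road : List Int) (x y : Int) :
    y ∈ gE (ernStep d road) x ↔ y ∈ gE d x ∨ roadTouch road x y := by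
  simp only [ernStep, gE, roadTouch]
  simp only [mem_cond_insert]
  tauto

lemma mem_gE_fold (roads : List (List Int)) (d : PySem.Dict Int (PySem.Set Int)) (x y : Int) :
    y ∈ gE (roads.foldl ernStep d) x ↔ y ∈ gE d x ∨ ∃ r ∈ roads, roadTouch r x y := by
  induction roads generalizing d with
  | nil => simp
  | cons r rs ih => simp [List.foldl_cons, ih, mem_gE_step]; tauto

-- ---------- B side ----------
lemma gB_mem_or_empty (adj : List (PySem.Set Int)) (x : Int) :
    gB adj x ∈ adj ∨ gB adj x = PySem.Set.empty := by
  unfold gB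
  rcases h : PySem.List.pyGet? adj x with _ | s
  · right; exact PySem.List.pyGetD_of_none adj x _ h
  · left
    have hm := PySem.List.mem_of_pyGet?_eq_some adj h
    simpa [PySem.List.pyGetD, h] using hm

lemma gB_init (n x : Int) (hx : 0 ≤ x) :
    gB ((PySem.List.pyRange 0 n 1).map (fun _ => PySem.Set.empty)) x = PySem.Set.empty := by
  unfold gB
  rw [PySem.List.pyGetD_of_nonneg _ _ hx, List.getD_eq_getElem?_getD, List.getElem?_map]
  cases (PySem.List.pyRange 0 n 1)[x.toNat]? <;> rfl

lemma mem_gB_setAdd (adj : List (PySem.Set Int)) (i j x y : Int)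
    (hi0 : 0 ≤ i) (hil : i < (adj.length : Int)) (hx0 : 0 ≤ x) (_hxl : x < (adj.length : Int)) :
    y ∈ gB (PySem.List.pySetD adj i (PySem.Set.add (gB adj i) j)) x
      ↔ y ∈ gB adj x ∨ (x = i ∧ y = j) := by
  unfold gB
  have hieq : i = ((i.toNat : Nat) : Int) := (Int.toNat_of_nonneg hi0).symm
  have hxeq : x = ((x.toNat : Nat) : Int) := (Int.toNat_of_nonneg hx0).symm
  rw [hieq, hxeq,
    PySem.List.pyGetD_pySetD_natCast adj i.toNat x.toNat _ _ (by omega)]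
  by_cases hxi : x.toNat = i.toNat
  · have hx_eq_i : x = i := by omega
    rw [if_pos hxi, PySem.Set.mem_add, ← hieq, ← hxeq]
    subst hx_eq_i
    tauto
  · have hne : ¬ x = i := by omega
    rw [if_neg hxi, ← hxeq, ← hieq]
    tauto

lemma length_ernBuild (adj : List (PySem.Set Int)) (road : List Int) :
    (ernBuild adj road).length = adj.length := by
  simp [ernBuild, PySem.List.length_pySetD]

lemma mem_gB_build (adj : List (PySem.Set Int)) (road : List Int) (x y : Int)
    (ha : 0 ≤ PySem.List.pyGetD road 0 0 ∧ PySem.List.pyGetD road 0 0 < (adj.length : Int))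
    (hb : 0 ≤ PySem.List.pyGetD road 1 0 ∧ PySem.List.pyGetD road 1 0 < (adj.length : Int))
    (hx0 : 0 ≤ x) (hxl : x < (adj.length : Int)) :
    y ∈ gB (ernBuild adj road) x ↔ y ∈ gB adj x ∨ roadTouch road x y := by
  unfold ernBuild roadTouch
  set a := PySem.List.pyGetD road 0 0 with hadef
  set b := PySem.List.pyGetD road 1 0 with hbdef
  set adj1 := PySem.List.pySetD adj a (PySem.Set.add (PySem.List.pyGetD adj a PySem.Set.empty) b) with hadj1
  have hlen1 : (adj1.length : Int) = (adj.length : Int) := by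
    rw [hadj1, PySem.List.length_pySetD]
  have h2 : y ∈ gB (PySem.List.pySetD adj1 b (PySem.Set.add (gB adj1 b) a)) x
      ↔ y ∈ gB adj1 x ∨ (x = b ∧ y = a) :=
    mem_gB_setAdd adj1 b a x y hb.1 (by omega) hx0 (by omega)
  have h1x : y ∈ gB adj1 x ↔ y ∈ gB adj x ∨ (x = a ∧ y = b) :=
    mem_gB_setAdd adj a b x y ha.1 ha.2 hx0 hxl
  show y ∈ gB (PySem.List.pySetD adj1 b (PySem.Set.add (gB adj1 b) a)) x ↔ _
  rw [h2, h1x]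
  tauto

lemma mem_gB_buildFold (roads : List (List Int)) (adj : List (PySem.Set Int)) (x y : Int)
    (hpre : ∀ r ∈ roads, 0 ≤ PySem.List.pyGetD r 0 0 ∧ PySem.List.pyGetD r 0 0 < (adj.length : Int) ∧
            0 ≤ PySem.List.pyGetD r 1 0 ∧ PySem.List.pyGetD r 1 0 < (adj.length : Int))
    (hx0 : 0 ≤ x) (hxl : x < (adj.length : Int)) :
    y ∈ gB (roads.foldl ernBuild adj) x ↔ y ∈ gB adj x ∨ ∃ r ∈ roads, roadTouch r x y := by
  induction roads generalizing adj with
  | nil => simp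
  | cons r rs ih =>
      have hr := hpre r (by simp)
      have hlen : ((ernBuild adj r).length : Int) = (adj.length : Int) := by
        rw [length_ernBuild]
      have h1 := ih (ernBuild adj r)
        (fun r' hr' => by rw [hlen]; exact hpre r' (by simp [hr'])) (by omega)
      rw [List.foldl_cons, h1,
        mem_gB_build adj r x y ⟨hr.1, hr.2.1⟩ ⟨hr.2.2.1, hr.2.2.2⟩ hx0 hxl]
      constructor
      · rintro ((h | h) | ⟨r', hr', ht⟩)
        · exact Or.inl h
        · exact Or.inr ⟨r, by simp, h⟩
        · exact Or.inr ⟨r', by simp [hr'], ht⟩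
      · rintro (h | ⟨r', hr', ht⟩)
        · exact Or.inl (Or.inl h)
        · rcases List.mem_cons.mp hr' with rfl | hr''
          · exact Or.inl (Or.inr ht)
          · exact Or.inr ⟨r', hr'', ht⟩

lemma nodup_ernBuild (adj : List (PySem.Set Int)) (road : List Int)
    (ha : 0 ≤ PySem.List.pyGetD road 0 0) (hb : 0 ≤ PySem.List.pyGetD road 1 0)
    (h : ∀ s ∈ adj, s.Nodup) : ∀ s ∈ ernBuild adj road, s.Nodup := by
  intro s hs
  unfold ernBuild at hs
  set a := PySem.List.pyGetD road 0 0
  set b := PySem.List.pyGetD road 1 0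
  set adj1 := PySem.List.pySetD adj a (PySem.Set.add (PySem.List.pyGetD adj a PySem.Set.empty) b) with hadj1
  have h1 : ∀ s ∈ adj1, s.Nodup := by
    intro s hs1
    rw [hadj1, PySem.List.pySetD_of_nonneg adj _ ha] at hs1
    rcases List.mem_or_eq_of_mem_set hs1 with hm | rfl
    · exact h s hm
    · apply PySem.Set.nodup_add
      rcases gB_mem_or_empty adj a with hm | he
      · exact h _ hm
      · rw [show PySem.List.pyGetD adj a PySem.Set.empty = gB adj a from rfl, he]
        exact List.nodup_nil
  rw [PySem.List.pySetD_of_nonneg adj1 _ hb] at hs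
  rcases List.mem_or_eq_of_mem_set hs with hm | rfl
  · exact h1 s hm
  · apply PySem.Set.nodup_add
    rcases gB_mem_or_empty adj1 b with hm | he
    · exact h1 _ hm
    · rw [show PySem.List.pyGetD adj1 b PySem.Set.empty = gB adj1 b from rfl, he]
      exact List.nodup_nil

lemma nodup_gB_buildFold (roads : List (List Int)) (adj : List (PySem.Set Int))
    (hpre : ∀ r ∈ roads, 0 ≤ PySem.List.pyGetD r 0 0 ∧ 0 ≤ PySem.List.pyGetD r 1 0)
    (h : ∀ s ∈ adj, s.Nodup) : ∀ s ∈ roads.foldl ernBuild adj, s.Nodup := by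
  induction roads generalizing adj with
  | nil => exact h
  | cons r rs ih =>
      have hr := hpre r (by simp)
      exact ih (ernBuild adj r) (fun r' hr' => hpre r' (by simp [hr']))
        (nodup_ernBuild adj r hr.1 hr.2 h)

lemma nodup_gB (adj : List (PySem.Set Int)) (h : ∀ s ∈ adj, s.Nodup) (x : Int) :
    (gB adj x).Nodup := by
  rcases gB_mem_or_empty adj x with hm | he
  · exact h _ hm
  · rw [he]; exact List.nodup_nil

-- ---------- shared ----------
lemma len_inter_pos_iff (s t : PySem.Set Int) :
    1 ≤ PySem.Set.len (PySem.Set.inter s t) ↔ ∃ k, k ∈ s ∧ k ∈ t := by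
  have hlen : PySem.Set.len (PySem.Set.inter s t) = ((PySem.Set.inter s t).length : Int) := rfl
  constructor
  · intro h
    have hpos : 0 < (PySem.Set.inter s t).length := by omega
    obtain ⟨k, hk⟩ := List.length_pos_iff_exists_mem.mp hpos
    exact ⟨k, (PySem.Set.mem_inter _ _ _).mp hk⟩
  · rintro ⟨k, hk1, hk2⟩
    have hk : k ∈ PySem.Set.inter s t := (PySem.Set.mem_inter _ _ _).mpr ⟨hk1, hk2⟩
    have := List.length_pos_iff_exists_mem.mpr ⟨k, hk⟩
    omega

lemma mem_foldl_union (l : List Int) (f : Int → PySem.Set Int) (s : PySem.Set Int) (y : Int) :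
    y ∈ l.foldl (fun r k => PySem.Set.union r (f k)) s ↔ y ∈ s ∨ ∃ k ∈ l, y ∈ f k := by
  induction l generalizing s with
  | nil => simp
  | cons a l ih => simp [List.foldl_cons, ih, PySem.Set.mem_union]; tauto

lemma nodup_foldl_union (l : List Int) (f : Int → PySem.Set Int) (s : PySem.Set Int)
    (h : s.Nodup) : (l.foldl (fun r k => PySem.Set.union r (f k)) s).Nodup := by
  induction l generalizing s with
  | nil => exact h
  | cons a l ih => exact ih _ (PySem.Set.nodup_union _ _ h)

lemma set_len_eq_iff (n : Int) (s : PySem.Set Int) (hn : 0 < n) (hnd : s.Nodup)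
    (hsub : ∀ y ∈ s, 0 ≤ y ∧ y < n) :
    PySem.Set.len s = n ↔ ∀ j, 0 ≤ j → j < n → j ∈ s := by
  have hsubl : s ⊆ PySem.List.pyRange 0 n 1 := fun {y} hy =>
    PySem.List.mem_pyRange_one.mpr ⟨(hsub y hy).1, (hsub y hy).2⟩
  have hlr : (PySem.List.pyRange 0 n 1).length = n.toNat := by
    rw [PySem.List.length_pyRange_one]; omega
  have hndr : (PySem.List.pyRange 0 n 1).Nodup := PySem.List.nodup_pyRange_one 0 n
  have hlen : PySem.Set.len s = (s.length : Int) := rfl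
  constructor
  · intro h j h0 hj
    have hsl : s.length = n.toNat := by omega
    have hsp : s.Subperm (PySem.List.pyRange 0 n 1) := hnd.subperm hsubl
    have hperm := hsp.perm_of_length_le (by omega)
    exact hperm.symm.subset (PySem.List.mem_pyRange_one.mpr ⟨h0, hj⟩)
  · intro h
    have hperm : s.Perm (PySem.List.pyRange 0 n 1) := (List.perm_ext_iff_of_nodup hnd hndr).mpr
      (fun a => ⟨fun ha => hsubl ha, fun ha => by
        have hb := PySem.List.mem_pyRange_one.mp ha
        exact h a hb.1 hb.2⟩)
    have := hperm.length_eq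
    omega

-- ===== VERDICT (by name: the statement is the Claim_ definition above) =====
theorem efficientRoadNetwork_spec : Claim_equal_efficientRoadNetwork := by
  intro n roads _hdom hpre
  unfold Spec_efficientRoadNetwork
  simp only [efficientRoadNetwork, efficientRoadNetwork_alt]
  rw [Bool.eq_iff_iff]
  simp only [List.all_eq_true, Bool.or_eq_true, decide_eq_true_iff, PySem.Set.contains_iff,
    gE_def, len_inter_pos_iff]
  set vd0 := (PySem.List.pyRange 0 n 1).foldl (fun d i => d.insert i PySem.Set.empty)
    PySem.Dict.empty with hvd0
  set vdA := roads.foldl ernStep vd0 with hvdA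
  set adj0 := (PySem.List.pyRange 0 n 1).map (fun _ => PySem.Set.empty) with hadj0
  set adjB := roads.foldl ernBuild adj0 with hadjB
  -- road endpoints and their bounds, from Pre_
  have hends : ∀ r ∈ roads, 0 ≤ PySem.List.pyGetD r 0 0 ∧ PySem.List.pyGetD r 0 0 < n ∧
      0 ≤ PySem.List.pyGetD r 1 0 ∧ PySem.List.pyGetD r 1 0 < n := by
    intro r hr
    obtain ⟨hlen2, hv⟩ := hpre r hr
    obtain ⟨a, b, rfl⟩ := List.length_eq_two.mp hlen2
    have ha := hv a (by simp)
    have hb := hv b (by simp)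
    have h0 : PySem.List.pyGetD [a, b] 0 0 = a := rfl
    have h1 : PySem.List.pyGetD [a, b] 1 0 = b := rfl
    rw [h0, h1]
    exact ⟨ha.1, ha.2, hb.1, hb.2⟩
  have hadj0len : (adj0.length : Int) = max n 0 := by
    rw [hadj0, List.length_map, PySem.List.length_pyRange_one]
    omega
  have hadjBlen : (adjB.length : Int) = max n 0 := by
    rw [hadjB]
    have : ∀ (rs : List (List Int)) (a : List (PySem.Set Int)),
        (rs.foldl ernBuild a).length = a.length := by
      intro rs
      induction rs with
      | nil => intro a; rfl
      | cons r rs ih => intro a; rw [List.foldl_cons, ih, length_ernBuild]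
    rw [this, ← hadj0len]
  -- 'edge x y': some road joins x and y
  have hg0 : ∀ x, gE vd0 x = PySem.Set.empty := gE_init _ _ (fun _ => rfl)
  have hmemA : ∀ x y, y ∈ gE vdA x ↔ ∃ r ∈ roads, roadTouch r x y := by
    intro x y
    rw [hvdA, mem_gE_fold, hg0]
    simp [PySem.Set.empty]
  have hmemB : ∀ x y, 0 ≤ x → x < n → (y ∈ gB adjB x ↔ ∃ r ∈ roads, roadTouch r x y) := by
    intro x y hx0 hxn
    rw [hadjB, mem_gB_buildFold roads adj0 x y
      (fun r hr => by
        have := hends r hr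
        refine ⟨this.1, by omega, this.2.2.1, by omega⟩)
      hx0 (by omega)]
    rw [gB_init n x hx0]
    simp [PySem.Set.empty]
  have htsym : ∀ (r : List Int) (x y : Int), roadTouch r x y ↔ roadTouch r y x := by
    intro r x y
    unfold roadTouch
    tauto
  have hrng : ∀ x y, (∃ r ∈ roads, roadTouch r x y) → (0 ≤ x ∧ x < n) ∧ (0 ≤ y ∧ y < n) := by
    rintro x y ⟨r, hr, ht⟩
    have hb := hends r hr
    unfold roadTouch at ht
    rcases ht with ⟨rfl, rfl⟩ | ⟨rfl, rfl⟩
    · exact ⟨⟨hb.1, hb.2.1⟩, hb.2.2.1, hb.2.2.2⟩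
    · exact ⟨⟨hb.2.2.1, hb.2.2.2⟩, hb.1, hb.2.1⟩
  have hndB : ∀ x, (gB adjB x).Nodup := by
    intro x
    refine nodup_gB adjB ?_ x
    rw [hadjB]
    refine nodup_gB_buildFold roads adj0
      (fun r hr => ⟨(hends r hr).1, (hends r hr).2.2.1⟩) ?_
    intro s hs
    rw [hadj0] at hs
    obtain ⟨_, _, rfl⟩ := List.mem_map.mp hs
    exact List.nodup_nil
  -- membership in B's reach set
  have hreach : ∀ i y, y ∈ (gB adjB i).foldl
      (fun r k => PySem.Set.union r (PySem.List.pyGetD adjB k PySem.Set.empty))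
      (PySem.Set.union (PySem.Set.add PySem.Set.empty i) (gB adjB i))
      ↔ y = i ∨ y ∈ gB adjB i ∨ ∃ k ∈ gB adjB i, y ∈ gB adjB k := by
    intro i y
    show y ∈ (gB adjB i).foldl (fun r k => PySem.Set.union r (gB adjB k))
      (PySem.Set.union (PySem.Set.add PySem.Set.empty i) (gB adjB i)) ↔ _
    rw [mem_foldl_union (gB adjB i) (fun k => gB adjB k)]
    simp only [PySem.Set.mem_union, PySem.Set.mem_add]
    constructor
    · rintro (((h | h) | h) | h)
      · exact absurd h (by simp [PySem.Set.empty])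
      · exact Or.inl h
      · exact Or.inr (Or.inl h)
      · exact Or.inr (Or.inr h)
    · rintro (h | h | h)
      · exact Or.inl (Or.inl (Or.inr h))
      · exact Or.inl (Or.inr h)
      · exact Or.inr h
  have hreachnd : ∀ i, ((gB adjB i).foldl
      (fun r k => PySem.Set.union r (PySem.List.pyGetD adjB k PySem.Set.empty))
      (PySem.Set.union (PySem.Set.add PySem.Set.empty i) (gB adjB i))).Nodup := by
    intro i
    exact nodup_foldl_union _ _ _
      (PySem.Set.nodup_union _ _ (PySem.Set.nodup_add _ _ List.nodup_nil))
  have hside : ∀ i, 0 ≤ i → i < n → ∀ y ∈ (gB adjB i).foldl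
      (fun r k => PySem.Set.union r (PySem.List.pyGetD adjB k PySem.Set.empty))
      (PySem.Set.union (PySem.Set.add PySem.Set.empty i) (gB adjB i)), 0 ≤ y ∧ y < n := by
    intro i h0 hi y hy
    rw [hreach] at hy
    rcases hy with rfl | hy | ⟨k, hk, hy⟩
    · exact ⟨h0, hi⟩
    · exact (hrng _ _ ((hmemB i y h0 hi).mp hy)).2
    · have hkb := (hrng _ _ ((hmemB i k h0 hi).mp hk)).2
      exact (hrng _ _ ((hmemB k y hkb.1 hkb.2).mp hy)).2
  have hcov : ∀ i, ernCovers n adjB i = true ↔ PySem.Set.len ((gB adjB i).foldl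
      (fun r k => PySem.Set.union r (PySem.List.pyGetD adjB k PySem.Set.empty))
      (PySem.Set.union (PySem.Set.add PySem.Set.empty i) (gB adjB i))) = n := by
    intro i
    simp only [ernCovers, decide_eq_true_iff]
    exact Iff.rfl
  constructor
  · -- A's pairwise condition → B's coverage
    intro hA i hi
    have hi' := PySem.List.mem_pyRange_one.mp hi
    have hn : 0 < n := by omega
    rw [hcov i]
    refine (set_len_eq_iff n _ hn (hreachnd i) (hside i hi'.1 hi'.2)).mpr ?_
    intro j h0 hj
    rw [hreach]
    by_cases hij : j = i
    · exact Or.inl hij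
    right
    rcases lt_or_gt_of_ne hij with hlt | hgt
    · -- j < i : instantiate A's pair (j, i)
      have hc := hA j (PySem.List.mem_pyRange_one.mpr ⟨h0, by omega⟩)
        i (PySem.List.mem_pyRange_one.mpr ⟨by omega, hi'.2⟩)
      rcases hc with (h | h) | ⟨k, hk1, hk2⟩
      · left
        exact (hmemB i j hi'.1 hi'.2).mpr ((hmemA _ _).mp h)
      · left
        refine (hmemB i j hi'.1 hi'.2).mpr ?_
        obtain ⟨r, hr, ht⟩ := (hmemA _ _).mp h
        exact ⟨r, hr, (htsym r _ _).mp ht⟩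
      · right
        have hke := (hmemA _ _).mp hk1
        have hkb := (hrng _ _ hke).2
        refine ⟨k, (hmemB i k hi'.1 hi'.2).mpr ((hmemA _ _).mp hk2), ?_⟩
        refine (hmemB k j hkb.1 hkb.2).mpr ?_
        obtain ⟨r, hr, ht⟩ := hke
        exact ⟨r, hr, (htsym r _ _).mp ht⟩
    · -- i < j : instantiate A's pair (i, j)
      have hc := hA i hi j (PySem.List.mem_pyRange_one.mpr ⟨by omega, hj⟩)
      rcases hc with (h | h) | ⟨k, hk1, hk2⟩
      · left
        refine (hmemB i j hi'.1 hi'.2).mpr ?_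
        obtain ⟨r, hr, ht⟩ := (hmemA _ _).mp h
        exact ⟨r, hr, (htsym r _ _).mp ht⟩
      · left
        exact (hmemB i j hi'.1 hi'.2).mpr ((hmemA _ _).mp h)
      · right
        have hke := (hmemA _ _).mp hk1
        have hkb := (hrng _ _ hke).2
        refine ⟨k, (hmemB i k hi'.1 hi'.2).mpr hke, ?_⟩
        refine (hmemB k j hkb.1 hkb.2).mpr ?_
        obtain ⟨r, hr, ht⟩ := (hmemA _ _).mp hk2
        exact ⟨r, hr, (htsym r _ _).mp ht⟩
  · -- B's coverage → A's pairwise condition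
    intro hB i hi j hj
    have hi' := PySem.List.mem_pyRange_one.mp hi
    have hj' := PySem.List.mem_pyRange_one.mp hj
    have hn : 0 < n := by omega
    have hmem := (set_len_eq_iff n _ hn (hreachnd i) (hside i hi'.1 hi'.2)).mp
      ((hcov i).mp (hB i hi)) j (by omega) hj'.2
    rw [hreach] at hmem
    rcases hmem with rfl | h | ⟨k, hk1, hk2⟩
    · exact absurd hj'.1 (by omega)
    · left; right
      exact (hmemA _ _).mpr ((hmemB i j hi'.1 hi'.2).mp h)
    · right
      have hke := (hmemB i k hi'.1 hi'.2).mp hk1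
      have hkb := (hrng _ _ hke).2
      refine ⟨k, (hmemA _ _).mpr hke, ?_⟩
      obtain ⟨r, hr, ht⟩ := (hmemB k j hkb.1 hkb.2).mp hk2
      exact (hmemA _ _).mpr ⟨r, hr, (htsym r k j).mp ht⟩
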